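-- pv_equiv track=rewrite | github.com/LJQ-HUB-cmyk/DLT-Evolution-Lab | apps/api/app/services/postmortem_service.py | _zone_buckets
-- ===== SOURCE A (Python) =====
-- def _zone_buckets(front: list[int]) -> tuple[int, int, int]:
--     """Zones 1-12, 13-24, 25-35."""
--     z = [0, 0, 0]
--     for n in front:
--         if n <= 12:
--             z[0] += 1
--         elif n <= 24:
--             z[1] += 1
--         else:
--             z[2] += 1
--     return z[0], z[1], z[2]
-- ===== SOURCE B (Python) =====
-- def _zone_buckets(front: list[int]) -> tuple[int, int, int]:
--     """Zones 1-12, 13-24, 25-35."""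
--     z0 = sum(1 for n in front if n <= 12)
--     z1 = sum(1 for n in front if 12 < n <= 24)
--     z2 = sum(1 for n in front if n > 24)
--     return z0, z1, z2
-- ===== Notes on version B (the rewrite author's own statement) =====
-- stated objective: alternative
-- what changed: Replaces the single-pass if/elif/else over a mutable 3-slot list with three independent filtered counts over exactly partitioning range predicates.
import Mathlib
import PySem

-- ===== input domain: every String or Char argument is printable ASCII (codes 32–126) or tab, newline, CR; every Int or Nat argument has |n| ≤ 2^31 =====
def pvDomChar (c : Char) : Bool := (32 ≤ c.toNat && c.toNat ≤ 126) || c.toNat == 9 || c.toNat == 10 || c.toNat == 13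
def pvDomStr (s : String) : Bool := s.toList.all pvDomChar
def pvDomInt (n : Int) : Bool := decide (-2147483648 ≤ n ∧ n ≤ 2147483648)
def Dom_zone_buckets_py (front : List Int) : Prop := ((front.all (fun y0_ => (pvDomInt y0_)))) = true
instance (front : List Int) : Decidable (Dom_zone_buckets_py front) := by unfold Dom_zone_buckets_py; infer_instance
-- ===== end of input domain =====

-- B counts each zone by a separate filtered scan instead of A's single pass with an if/elif/else over three accumulators; same cost, different decomposition.

-- ===== PORT A =====
-- single fold carrying the 3-slot accumulator, branches in A's order
def zone_buckets_py (front : List Int) : Int × Int × Int :=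
  let z := front.foldl (fun (z : Int × Int × Int) n =>
    if n ≤ 12 then (z.1 + 1, z.2.1, z.2.2)
    else if n ≤ 24 then (z.1, z.2.1 + 1, z.2.2)
    else (z.1, z.2.1, z.2.2 + 1)) (0, 0, 0)
  (z.1, z.2.1, z.2.2)

-- ===== PORT B =====
-- three independent filtered counts
def zone_buckets_py_alt (front : List Int) : Int × Int × Int :=
  ((front.countP (fun n => n ≤ 12) : Int),
   (front.countP (fun n => 12 < n ∧ n ≤ 24) : Int),
   (front.countP (fun n => 24 < n) : Int))

-- ===== PRECONDITION & SPEC =====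
def Spec_zone_buckets_py (front : List Int) (out : Int × Int × Int) : Prop := out = zone_buckets_py_alt front
instance (front : List Int) (out : Int × Int × Int) : Decidable (Spec_zone_buckets_py front out) := by unfold Spec_zone_buckets_py; infer_instance

-- ===== CLAIM (what is proved, stated in full; the proofs are below) =====
def Claim_equal_zone_buckets_py : Prop := ∀ (front : List Int), Dom_zone_buckets_py front → Spec_zone_buckets_py front (zone_buckets_py front)

-- ===== LEMMAS AND PROOFS =====

-- fold invariant: the fold from an arbitrary start adds B's three counts componentwise
lemma zone_fold_inv (front : List Int) (a b c : Int) :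
    front.foldl (fun (z : Int × Int × Int) n =>
      if n ≤ 12 then (z.1 + 1, z.2.1, z.2.2)
      else if n ≤ 24 then (z.1, z.2.1 + 1, z.2.2)
      else (z.1, z.2.1, z.2.2 + 1)) (a, b, c)
    = (a + (front.countP (fun n => n ≤ 12) : Int),
       b + (front.countP (fun n => 12 < n ∧ n ≤ 24) : Int),
       c + (front.countP (fun n => 24 < n) : Int)) := by
  induction front generalizing a b c with
  | nil => simp [List.countP]
  | cons x xs ih =>
    simp only [List.foldl_cons, List.countP_cons]
    by_cases h1 : x ≤ 12
    · have e2 : ¬(12 < x ∧ x ≤ 24) := by omega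
      have e3 : ¬(24 < x) := by omega
      simp only [ih, h1, e2, e3, decide_true, decide_false,
        if_true, Prod.mk.injEq]
      refine ⟨by push_cast; ring, rfl, rfl⟩
    · by_cases h2 : x ≤ 24
      · have e1 : (12 < x ∧ x ≤ 24) := by omega
        have e3 : ¬(24 < x) := by omega
        simp only [ih, h1, h2, e1, e3, decide_true, decide_false, and_self,
          if_true, if_false, Prod.mk.injEq]
        refine ⟨rfl, by push_cast; ring, rfl⟩
      · have e3 : (24 < x) := by omega
        simp only [ih, h1, h2, e3, decide_true, decide_false, and_false,
          if_true, if_false, Prod.mk.injEq]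
        refine ⟨rfl, rfl, by push_cast; ring⟩

-- ===== VERDICT (by name: the statement is the Claim_ definition above) =====
theorem zone_buckets_py_spec : Claim_equal_zone_buckets_py := by
  intro front _
  unfold Spec_zone_buckets_py zone_buckets_py zone_buckets_py_alt
  simp [zone_fold_inv]
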